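-- pv_equiv track=rewrite | github.com/BH-Fang/HomeWork | 114-1/038.py | getLeadIndexs
-- ===== SOURCE A (Python) =====
-- def isConform(S, subStr):
--     for i, ch in enumerate(S):
--         if ch == '?':
--             continue
--         elif ch != subStr[i]:
--             return False
--     return True
--
-- def getLeadIndexs(L, S):
--     indexs = []
--     S_len = len(S)
--
--     for i in range(len(L) - S_len + 1):
--         subStr = L[i: i + S_len]
--         if isConform(S, subStr):
--             indexs.append(i + S_len)
--     return indexs
-- ===== SOURCE B (Python) =====
-- def getLeadIndexs(L, S):
--     # Bit-parallel Shift-And matcher with '?' wildcards.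
--     m = len(S)
--     if m == 0:
--         return list(range(len(L) + 1))
--     wild = 0
--     masks = {}
--     for j, ch in enumerate(S):
--         bit = 1 << j
--         if ch == '?':
--             wild |= bit
--         else:
--             masks[ch] = masks.get(ch, 0) | bit
--     goal = 1 << (m - 1)
--     state = 0
--     out = []
--     for i, ch in enumerate(L):
--         state = ((state << 1) | 1) & (wild | masks.get(ch, 0))
--         if state & goal:
--             out.append(i + 1)
--     return out
-- ===== Notes on version B (the rewrite author's own statement) =====
-- stated objective: alternative
-- what changed: Replaced A's per-window slice-and-rescan (isConform on every substring) by a bit-parallel Shift-And automaton: precomputed per-character bitmasks for the pattern (with a wildcard mask for '?') and one shift/OR/AND state update per text character; faster for short patterns but slower when the pattern is as long as the text, so no speed is claimed.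
import Mathlib
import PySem

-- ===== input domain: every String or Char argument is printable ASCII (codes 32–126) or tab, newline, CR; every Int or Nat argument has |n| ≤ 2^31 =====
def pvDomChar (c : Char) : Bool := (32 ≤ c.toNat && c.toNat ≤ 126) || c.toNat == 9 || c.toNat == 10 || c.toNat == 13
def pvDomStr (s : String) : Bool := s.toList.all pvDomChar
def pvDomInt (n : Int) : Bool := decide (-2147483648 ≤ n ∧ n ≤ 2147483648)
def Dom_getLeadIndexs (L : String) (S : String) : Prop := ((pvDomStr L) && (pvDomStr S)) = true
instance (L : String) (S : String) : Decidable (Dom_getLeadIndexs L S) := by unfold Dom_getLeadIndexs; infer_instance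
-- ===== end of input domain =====

-- B replaces A's per-window rescan by a bit-parallel Shift-And automaton over the text (one
-- bitmask update per character); same return value, proved equivalent below.

-- ===== PORT A =====
-- helper: the loop of isConform over enumerate(S); Python raises IndexError on subStr[i] out of
-- range (the 'none' branch) — unreachable from getLeadIndexs, where subStr always has len(S) chars.
def isConformGo (subStr : String) : List (Int × Char) → Bool
  | [] => true
  | (i, ch) :: rest =>
    if ch = '?' then isConformGo subStr rest
    else
      match PySem.Str.pyGet? subStr i with
      | none => false
      | some c => if ch ≠ c then false else isConformGo subStr rest

def isConform (S : String) (subStr : String) : Bool :=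
  isConformGo subStr (PySem.List.enumerate S.toList)

def getLeadIndexs (L : String) (S : String) : List Int :=
  let S_len : Int := PySem.Str.len S
  (PySem.List.pyRange 0 (PySem.Str.len L - S_len + 1) 1).foldl
    (fun indexs i =>
      if isConform S (PySem.Str.slice L (some i) (some (i + S_len))) then indexs ++ [i + S_len]
      else indexs) []

-- ===== PORT B =====
-- one step of Source B's mask-building loop over enumerate(S): '?' goes into wild, a letter into masks
def altBuildStep (wm : Nat × PySem.Dict Char Nat) (jc : Int × Char) : Nat × PySem.Dict Char Nat :=
  let bit : Nat := 1 <<< jc.1.toNat   -- j from enumerate is ≥ 0, so toNat is exact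
  if jc.2 = '?' then (wm.1 ||| bit, wm.2)
  else (wm.1, wm.2.insert jc.2 (wm.2.getD jc.2 0 ||| bit))

-- one step of Source B's scan loop: state update and conditional append of i+1
def altScanStep (wild : Nat) (masks : PySem.Dict Char Nat) (goal : Nat)
    (so : Nat × List Int) (ic : Int × Char) : Nat × List Int :=
  let st := ((so.1 <<< 1) ||| 1) &&& (wild ||| masks.getD ic.2 0)
  (st, if st &&& goal ≠ 0 then so.2 ++ [ic.1 + 1] else so.2)

def getLeadIndexs_alt (L : String) (S : String) : List Int :=
  let m : Int := PySem.Str.len S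
  if m = 0 then PySem.List.pyRange 0 (PySem.Str.len L + 1) 1
  else
    let wm := (PySem.List.enumerate S.toList).foldl altBuildStep (0, PySem.Dict.empty)
    let goal : Nat := 1 <<< (m.toNat - 1)
    ((PySem.List.enumerate L.toList).foldl (altScanStep wm.1 wm.2 goal) (0, [])).2

-- ===== PRECONDITION & SPEC =====
def Spec_getLeadIndexs (L : String) (S : String) (out : List Int) : Prop := out = getLeadIndexs_alt L S
instance (L : String) (S : String) (out : List Int) : Decidable (Spec_getLeadIndexs L S out) := by unfold Spec_getLeadIndexs; infer_instance

-- ===== CLAIM (what is proved, stated in full; the proofs are below) =====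
def Claim_equal_getLeadIndexs : Prop := ∀ (L : String) (S : String), Dom_getLeadIndexs L S → Spec_getLeadIndexs L S (getLeadIndexs L S)

-- ===== LEMMAS AND PROOFS =====

def conf2 : List Char → List Char → Bool
  | [], _ => true
  | p :: ps, us =>
    if p = '?' then conf2 ps us.tail
    else
      match us with
      | [] => false
      | u :: us' => if p = u then conf2 ps us' else false

def resSpec (ss ls : List Char) : List Int :=
  ((List.range (ls.length + 1 - ss.length)).filter (fun i => conf2 ss (ls.drop i))).map
    (fun i : Nat => (i : Int) + (ss.length : Int))

lemma conf2_single (c u : Char) (us : List Char) :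
    conf2 [c] (u :: us) = (c == '?' || c == u) := by
  by_cases h : c = '?' <;> by_cases h2 : c = u <;> simp [conf2, h, h2]

lemma conf2_append (ps qs us : List Char) :
    conf2 (ps ++ qs) us = (conf2 ps us && conf2 qs (us.drop ps.length)) := by
  induction ps generalizing us with
  | nil => simp [conf2]
  | cons p ps ih =>
    by_cases h : p = '?'
    · simp [conf2, h, ih, ← List.drop_one, List.drop_drop, Nat.add_comm]
    · cases us with
      | nil => simp [conf2, h]
      | cons u us' =>
        by_cases h2 : p = u <;> simp [conf2, h, h2, ih]

lemma conf2_take (ps us : List Char) :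
    conf2 ps (us.take ps.length) = conf2 ps us := by
  induction ps generalizing us with
  | nil => simp [conf2]
  | cons p ps ih =>
    cases us with
    | nil => simp
    | cons u us' =>
      by_cases h : p = '?' <;> by_cases h2 : p = u <;>
        simp [conf2, h, h2, ih]

lemma drop_eq_cons_of_getElem? {l : List Char} {k : Nat} {u : Char}
    (hh : l[k]? = some u) : List.drop k l = u :: List.drop (k + 1) l := by
  cases hc : List.drop k l with
  | nil =>
    have h1 : (List.drop k l).head? = l[k]? := List.head?_drop
    rw [hc, hh] at h1; simp at h1
  | cons a t =>
    have h1 : (List.drop k l).head? = l[k]? := List.head?_drop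
    rw [hc, hh] at h1
    have h2 : (List.drop k l).tail = List.drop (k + 1) l := List.tail_drop
    rw [hc] at h2
    simp at h1 h2
    rw [h1, h2]

lemma isConformGo_eq (sub : String) (ps : List Char) (k : Nat) :
    isConformGo sub (PySem.List.enumerate ps (k : Int)) = conf2 ps (sub.toList.drop k) := by
  induction ps generalizing k with
  | nil => simp [PySem.List.enumerate_nil, isConformGo, conf2]
  | cons p ps ih =>
    rw [PySem.List.enumerate_cons]
    have hk1 : (k : Int) + 1 = ((k + 1 : Nat) : Int) := by push_cast; ring
    have hget : PySem.Str.pyGet? sub (k : Int) = sub.toList[k]? := by simp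
    by_cases h : p = '?'
    · simp only [isConformGo, h, if_true, hk1, ih, conf2, List.tail_drop]
    · rw [show isConformGo sub ((((k : Int)), p) :: PySem.List.enumerate ps ((k : Int) + 1)) =
          (match PySem.Str.pyGet? sub (k : Int) with
           | none => false
           | some c => if p ≠ c then false
               else isConformGo sub (PySem.List.enumerate ps ((k : Int) + 1))) by
        simp [isConformGo, h]]
      rw [hget, hk1, ih]
      cases hh : sub.toList[k]? with
      | none =>
        have hnil : List.drop k sub.toList = [] := by
          cases hc : List.drop k sub.toList with
          | nil => rfl
          | cons a t =>
            have h1 : (List.drop k sub.toList).head? = sub.toList[k]? := List.head?_drop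
            rw [hc, hh] at h1; simp at h1
        rw [hnil]
        simp [conf2, h]
      | some u =>
        rw [drop_eq_cons_of_getElem? hh]
        by_cases h2 : p = u <;> simp [conf2, h, h2]

lemma isConform_eq (S sub : String) :
    isConform S sub = conf2 S.toList sub.toList := by
  have := isConformGo_eq sub S.toList 0
  simpa [isConform] using this

lemma A_eq (L S : String) : getLeadIndexs L S = resSpec S.toList L.toList := by
  unfold getLeadIndexs
  simp only [PySem.Str.len_eq]
  rw [PySem.List.pyRange_one]
  have hb : ((L.toList.length : Int) - S.toList.length + 1 - 0).toNat
      = L.toList.length + 1 - S.toList.length := by omega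
  rw [hb, List.foldl_map, PySem.List.foldl_append_if, List.nil_append]
  rw [List.filter_congr (q := fun i => conf2 S.toList (L.toList.drop i)) ?_]
  · unfold resSpec
    apply List.map_congr_left
    intro i _
    simp
  · intro i _
    rw [isConform_eq]
    simp only [PySem.Str.toList_slice, PySem.Chars.slice_eq_listSlice]
    rw [show (0 : Int) + (i : Int) = (i : Int) by ring]
    rw [show (i : Int) + (S.toList.length : Int) = ((i : Int) + ((S.toList.length : Nat) : Int)) by norm_cast]
    rw [PySem.List.slice_natCast_add]
    exact conf2_take S.toList (L.toList.drop i)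

lemma tail_shift (ps : List Char) (p c : Char) (k j : Nat) (hj : j ≠ k) :
    (decide (k + 1 ≤ j ∧ j < (k + 1) + ps.length) &&
      (ps.getD (j - (k + 1)) 'x' == '?' || ps.getD (j - (k + 1)) 'x' == c))
    = (decide (k ≤ j ∧ j < k + (p :: ps).length) &&
      ((p :: ps).getD (j - k) 'x' == '?' || (p :: ps).getD (j - k) 'x' == c)) := by
  by_cases hkj : k + 1 ≤ j
  · have h1 : j - k = (j - (k + 1)) + 1 := by omega
    rw [h1, List.getD_cons_succ]
    rw [show decide (k + 1 ≤ j ∧ j < (k + 1) + ps.length)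
        = decide (k ≤ j ∧ j < k + (p :: ps).length) from by
      rw [decide_eq_decide]; simp; omega]
  · have d1 : decide (k + 1 ≤ j ∧ j < (k + 1) + ps.length) = false := by simp; omega
    have d2 : decide (k ≤ j ∧ j < k + (p :: ps).length) = false := by
      simp; intro h; omega
    rw [d1, d2]; simp

lemma mask_build (ps : List Char) (k : Nat) (w : Nat) (d : PySem.Dict Char Nat) (c : Char) (j : Nat) :
    (((PySem.List.enumerate ps (k : Int)).foldl altBuildStep (w, d)).1 |||
      ((PySem.List.enumerate ps (k : Int)).foldl altBuildStep (w, d)).2.getD c 0).testBit j =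
    ((w ||| d.getD c 0).testBit j ||
      (decide (k ≤ j ∧ j < k + ps.length) &&
        (ps.getD (j - k) 'x' == '?' || ps.getD (j - k) 'x' == c))) := by
  induction ps generalizing k w d with
  | nil =>
    simp [PySem.List.enumerate_nil]
  | cons p ps ih =>
    rw [PySem.List.enumerate_cons,
      show (k : Int) + 1 = ((k + 1 : Nat) : Int) by push_cast; ring]
    simp only [List.foldl_cons]
    by_cases hp : p = '?'
    · rw [show altBuildStep (w, d) ((k : Int), p) = (w ||| 1 <<< k, d) by
        simp [altBuildStep, hp]]
      rw [ih]
      by_cases hj : j = k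
      · subst hj
        simp [Nat.testBit_or, Nat.one_shiftLeft, hp]
      · rw [tail_shift ps p c k j hj]
        simp only [Nat.testBit_or, Nat.one_shiftLeft, Nat.testBit_two_pow]
        rw [show (decide (k = j)) = false by simp; exact fun h => hj h.symm]
        simp
    · rw [show altBuildStep (w, d) ((k : Int), p) = (w, d.insert p (d.getD p 0 ||| 1 <<< k)) by
        simp [altBuildStep, hp]]
      rw [ih]
      rw [PySem.Dict.getD_insert]
      by_cases hc : c = p
      · subst hc
        rw [if_pos rfl]
        by_cases hj : j = k
        · subst hj
          simp [Nat.testBit_or, Nat.one_shiftLeft]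
        · rw [tail_shift ps c c k j hj]
          simp only [Nat.testBit_or, Nat.one_shiftLeft, Nat.testBit_two_pow]
          rw [show (decide (k = j)) = false by simp; exact fun h => hj h.symm]
          simp [Bool.or_assoc, Bool.or_comm]
      · rw [if_neg hc]
        by_cases hj : j = k
        · subst hj
          have e1 : (p == '?') = false := by simp [hp]
          have e2 : (p == c) = false := by simp; exact fun h => hc h.symm
          simp [Nat.testBit_or, e1, e2]
        · rw [tail_shift ps p c k j hj]

lemma and_two_pow_ne_zero (x k : Nat) : (x &&& 2 ^ k ≠ 0) = (x.testBit k = true) := by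
  rw [Nat.and_two_pow]
  cases x.testBit k <;> simp

lemma scan_loop (ss ls : List Char) (wild : Nat) (masks : PySem.Dict Char Nat) (goal : Nat)
    (hm : 1 ≤ ss.length)
    (hmask : ∀ (c : Char) (j : Nat), (wild ||| masks.getD c 0).testBit j =
      (decide (j < ss.length) && (ss.getD j 'x' == '?' || ss.getD j 'x' == c)))
    (hgoal : goal = 1 <<< (ss.length - 1)) :
    ∀ (suf : List Char) (p : Nat) (st : Nat) (out : List Int),
      suf = ls.drop p → p ≤ ls.length →
      (∀ j : Nat, st.testBit j =
        (decide (j + 1 ≤ p) && decide (j < ss.length) &&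
          conf2 (ss.take (j + 1)) (ls.drop (p - (j + 1))))) →
      ((PySem.List.enumerate suf (p : Int)).foldl (altScanStep wild masks goal) (st, out)).2 =
        out ++ ((List.range' p (ls.length - p)).filter
            (fun e => decide (ss.length ≤ e + 1) && conf2 ss (ls.drop (e + 1 - ss.length)))).map
          (fun e : Nat => (e : Int) + 1) := by
  intro suf
  induction suf with
  | nil =>
    intro p st out hsuf hp hst
    have hpn : p = ls.length := by
      have := List.drop_eq_nil_iff.mp hsuf.symm
      omega
    simp [PySem.List.enumerate_nil, hpn]
  | cons ch rest ih =>
    intro p st out hsuf hp hst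
    -- the current char is ls[p], and rest is the rest
    have hgetp : ls[p]? = some ch := by
      rw [← List.head?_drop, ← hsuf]; rfl
    have hpn : p < ls.length := by
      by_contra h
      rw [List.getElem?_eq_none_iff.mpr (by omega)] at hgetp; simp at hgetp
    have hrest : rest = ls.drop (p + 1) := by
      have : (ls.drop p).tail = ls.drop (p + 1) := List.tail_drop
      rw [← hsuf] at this; simpa using this
    have hdropp : ls.drop p = ch :: rest := hsuf.symm
    rw [PySem.List.enumerate_cons,
      show (p : Int) + 1 = ((p + 1 : Nat) : Int) by push_cast; ring]
    simp only [List.foldl_cons]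
    -- the new state
    set st' := ((st <<< 1) ||| 1) &&& (wild ||| masks.getD ch 0) with hst'def
    have hstep : altScanStep wild masks goal (st, out) ((p : Int), ch)
        = (st', if st' &&& goal ≠ 0 then out ++ [(p : Int) + 1] else out) := rfl
    -- the invariant for the new state
    have hst' : ∀ j : Nat, st'.testBit j =
        (decide (j + 1 ≤ p + 1) && decide (j < ss.length) &&
          conf2 (ss.take (j + 1)) (ls.drop (p + 1 - (j + 1)))) := by
      intro j
      have hone : Nat.testBit 1 j = decide (0 = j) := by
        rw [show (1 : Nat) = 2 ^ 0 by norm_num, Nat.testBit_two_pow]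
      rw [hst'def]
      rw [Nat.testBit_and, Nat.testBit_or, Nat.testBit_shiftLeft, hone, hmask]
      cases j with
      | zero =>
        obtain ⟨s0, tl, hss⟩ : ∃ s0 tl, ss = s0 :: tl := by
          cases ss with
          | nil => simp at hm
          | cons a t => exact ⟨a, t, rfl⟩
        simp only [hss, List.getD_cons_zero,
          Nat.add_sub_cancel, hdropp]
        rw [← conf2_single s0 ch rest]
        have : 0 < ss.length := hm
        simp [hss] at this ⊢
      | succ t =>
        have hsh : (decide (t + 1 ≥ 1) && st.testBit (t + 1 - 1) || decide (0 = t + 1))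
            = st.testBit t := by simp
        rw [hsh, hst]
        by_cases h1 : t + 1 ≤ p
        · by_cases h2 : t + 1 < ss.length
          · have e1 : decide (t + 1 ≤ p) = true := by simp [h1]
            have e2 : decide (t < ss.length) = true := by simp; omega
            have e3 : decide (t + 1 < ss.length) = true := by simp [h2]
            have e4 : decide (t + 1 + 1 ≤ p + 1) = true := by simp; omega
            rw [e1, e2, e3, e4]
            have htake : ss.take (t + 1 + 1) = ss.take (t + 1) ++ [ss[t + 1]] := by
              rw [List.take_add_one, List.getElem?_eq_getElem h2]; rfl
            have hp1 : p + 1 - (t + 1 + 1) = p - (t + 1) := by omega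
            rw [hp1, htake, conf2_append]
            have hlen : (ss.take (t + 1)).length = t + 1 := by
              rw [List.length_take]; omega
            rw [hlen, List.drop_drop, show p - (t + 1) + (t + 1) = p by omega, hdropp,
              conf2_single]
            have hgd : ss.getD (t + 1) 'x' = ss[t + 1] := List.getD_eq_getElem ss 'x' h2
            rw [hgd]
            cases hc2 : conf2 (ss.take (t + 1)) (ls.drop (p - (t + 1))) <;> simp
          · have e3 : decide (t + 1 < ss.length) = false := by simp; omega
            rw [e3]
            simp
        · have e1 : decide (t + 1 ≤ p) = false := by simp; omega
          have e4 : decide (t + 1 + 1 ≤ p + 1) = false := by simp; omega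
          rw [e1, e4]
          simp
    -- the bit test is the window test ending at p
    have hbit : (st' &&& goal ≠ 0)
        = (decide (ss.length ≤ p + 1) && conf2 ss (ls.drop (p + 1 - ss.length)) = true) := by
      rw [hgoal, Nat.one_shiftLeft, and_two_pow_ne_zero, hst' (ss.length - 1)]
      have h1 : ss.length - 1 + 1 = ss.length := by omega
      rw [h1, List.take_length,
        show decide (ss.length - 1 < ss.length) = true from by simp; omega]
      simp
    rw [hstep]
    rw [ih (p + 1) st' _ hrest (by omega) hst']
    -- both sides: split off the head of range'
    have hrange : List.range' p (ls.length - p) = p :: List.range' (p + 1) (ls.length - (p + 1)) := by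
      rw [show ls.length - p = (ls.length - (p + 1)) + 1 by omega, List.range'_succ]
    rw [hrange]
    rw [List.filter_cons]
    simp only [hbit]
    by_cases hΦ : (decide (ss.length ≤ p + 1) && conf2 ss (ls.drop (p + 1 - ss.length))) = true
    · rw [if_pos hΦ, if_pos (by simpa using hΦ)]
      simp
    · rw [if_neg hΦ, if_neg (by simpa using hΦ)]

lemma reindex (ss ls : List Char) (hm : 1 ≤ ss.length) :
    ((List.range ls.length).filter
        (fun e => decide (ss.length ≤ e + 1) && conf2 ss (ls.drop (e + 1 - ss.length)))).map
      (fun e : Nat => (e : Int) + 1) = resSpec ss ls := by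
  by_cases hmn : ss.length ≤ ls.length + 1
  · have hn : ls.length = (ss.length - 1) + (ls.length + 1 - ss.length) := by omega
    rw [show List.range ls.length
        = List.range ((ss.length - 1) + (ls.length + 1 - ss.length)) from by rw [← hn]]
    rw [List.range_add, List.filter_append, List.map_append]
    rw [List.filter_eq_nil_iff.mpr (fun e he => by
      simp at he ⊢
      intro hle; omega)]
    rw [List.filter_map, List.map_map]
    unfold resSpec
    rw [List.filter_congr (q := fun i => conf2 ss (ls.drop i)) (fun i _ => by
      simp only [Function.comp_apply]
      rw [show ss.length - 1 + i + 1 - ss.length = i from by omega,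
        show decide (ss.length ≤ ss.length - 1 + i + 1) = true from by simp; omega]
      simp)]
    rw [List.map_nil, List.nil_append]
    apply List.map_congr_left
    intro i _
    simp only [Function.comp_apply]
    push_cast
    omega
  · rw [List.filter_eq_nil_iff.mpr (fun e he => by
      simp at he ⊢
      intro hle; omega)]
    unfold resSpec
    rw [show ls.length + 1 - ss.length = 0 from by omega]
    simp

lemma B_eq (L S : String) : getLeadIndexs_alt L S = resSpec S.toList L.toList := by
  by_cases h0 : S.toList.length = 0
  · have hnil : S.toList = [] := List.length_eq_zero_iff.mp h0
    simp only [getLeadIndexs_alt, PySem.Str.len_eq, hnil, List.length_nil]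
    rw [if_pos (by norm_num)]
    rw [PySem.List.pyRange_one]
    rw [show ((L.toList.length : Int) + 1 - 0).toNat = L.toList.length + 1 from by omega]
    unfold resSpec
    simp [conf2]
  · have hm : 1 ≤ S.toList.length := by omega
    simp only [getLeadIndexs_alt, PySem.Str.len_eq, Int.toNat_natCast]
    rw [if_neg (by simpa using h0)]
    have hmask : ∀ (c : Char) (j : Nat),
        ((((PySem.List.enumerate S.toList).foldl altBuildStep (0, PySem.Dict.empty)).1 |||
          ((PySem.List.enumerate S.toList).foldl altBuildStep (0, PySem.Dict.empty)).2.getD c 0).testBit j)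
        = (decide (j < S.toList.length) &&
            (S.toList.getD j 'x' == '?' || S.toList.getD j 'x' == c)) := by
      intro c j
      have := mask_build S.toList 0 0 PySem.Dict.empty c j
      rw [show ((0 : Nat) : Int) = (0 : Int) from rfl] at this
      rw [this]
      rw [PySem.Dict.getD_empty]
      simp only [Nat.zero_or, Nat.zero_testBit, Bool.false_or, Nat.zero_add, Nat.sub_zero]
      rw [show decide (0 ≤ j ∧ j < S.toList.length) = decide (j < S.toList.length) from by
        rw [decide_eq_decide]; omega]
    have hscan := scan_loop S.toList L.toList _ _ _ hm hmask
      rfl L.toList 0 0 []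
      (by rw [List.drop_zero]) (by omega)
      (by intro j; simp [Nat.zero_testBit])
    rw [show ((0 : Nat) : Int) = (0 : Int) from rfl] at hscan
    rw [hscan]
    rw [List.nil_append, Nat.sub_zero, ← List.range_eq_range']
    exact reindex S.toList L.toList hm

-- ===== VERDICT (by name: the statement is the Claim_ definition above) =====
theorem getLeadIndexs_spec : Claim_equal_getLeadIndexs := by
  intro L S _
  unfold Spec_getLeadIndexs
  rw [A_eq, B_eq]
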